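-- pv_equiv track=rewrite | github.com/ironicbadger/infra | legacy/roles/ironicbadger.docker-compose-generator/filter_plugins/yaml_indent.py | indent_yaml_lists
-- ===== SOURCE A (Python) =====
-- def get_indent(line):
--     """Return the indentation level (number of leading spaces) of a line."""
--     return len(line) - len(line.lstrip())
--
-- def is_list_key(line):
--     """Check if line is a key that could start a list (ends with : but not ::)."""
--     stripped = line.strip()
--     return stripped.endswith(':') and not stripped.endswith('::')
--
-- def is_list_item(line):
--     """Check if line is a YAML list item (starts with '- ')."""
--     return line.lstrip().startswith('- ')
--
-- def indent_yaml_lists(content):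
--     """
--     Transform YAML so list items are indented under their parent key.
--
--     Before:
--         environment:
--         - FOO=bar
--         volumes:
--         - /data:/data
--
--     After:
--         environment:
--           - FOO=bar
--         volumes:
--           - /data:/data
--
--     Also handles list items that are dicts:
--     Before:
--         configs:
--         - source: test
--           target: /etc/test
--
--     After:
--         configs:
--           - source: test
--             target: /etc/test
--     """
--     lines = content.split('\n')
--     result = []
--     in_list_block = False
--     list_base_indent = 0
--
--     for line in lines:
--         stripped = line.lstrip()
--         current_indent = get_indent(line)
--
--         # Check if previous line was a key that could start a list
--         if result and not in_list_block:
--             prev_line = result[-1]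
--             if is_list_key(prev_line):
--                 prev_indent = get_indent(prev_line)
--                 # If this line is a list item at the same indent level
--                 if is_list_item(line) and current_indent == prev_indent:
--                     in_list_block = True
--                     list_base_indent = prev_indent
--
--         if in_list_block:
--             # Check if we've left the list block
--             if stripped and not is_list_item(line) and current_indent <= list_base_indent:
--                 in_list_block = False
--                 result.append(line)
--             elif is_list_item(line) and current_indent == list_base_indent:
--                 # List item - add 2 spaces
--                 result.append(' ' * (list_base_indent + 2) + stripped)
--             elif current_indent == list_base_indent and stripped:
--                 # Continuation of list item dict - add 2 spaces
--                 result.append(' ' * (list_base_indent + 2) + stripped)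
--             elif not stripped:
--                 # Empty line
--                 result.append(line)
--                 in_list_block = False
--             else:
--                 # Nested content - add 2 spaces
--                 result.append('  ' + line)
--         else:
--             result.append(line)
--
--     return '\n'.join(result)
-- ===== SOURCE B (Python) =====
-- def indent_yaml_lists(content):
--     """Outer-scan/inner-consume re-indentation of YAML list blocks (same result as the flag-based single pass)."""
--     lines = content.split('\n')
--     n = len(lines)
--     out = []
--     i = 0
--     while i < n:
--         line = lines[i]
--         out.append(line)
--         s = line.strip()
--         key_is_list = s.endswith(':') and not s.endswith('::')
--         parent_indent = len(line) - len(line.lstrip())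
--         i += 1
--         if key_is_list and i < n:
--             nxt = lines[i]
--             if nxt.lstrip().startswith('- ') and len(nxt) - len(nxt.lstrip()) == parent_indent:
--                 base = parent_indent
--                 # consume the list block
--                 while i < n:
--                     cur = lines[i]
--                     st = cur.lstrip()
--                     ind = len(cur) - len(st)
--                     if not st:
--                         out.append(cur)
--                         i += 1
--                         break
--                     if not st.startswith('- ') and ind <= base:
--                         break  # hand this line back to the outer scan
--                     if st.startswith('- ') and ind == base:
--                         out.append(' ' * (base + 2) + st)
--                     else:
--                         out.append('  ' + cur)
--                     i += 1
--     return '\n'.join(out)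
-- ===== Notes on version B (the rewrite author's own statement) =====
-- stated objective: alternative
-- what changed: Replaces A's single flat pass gated by an in_list_block boolean (with a look-back at the last appended output line) with an outer scan that detects a list-key line followed by an equal-indent list item and hands the block to an inner consumer loop that reindents until the block ends.
import Mathlib
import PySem

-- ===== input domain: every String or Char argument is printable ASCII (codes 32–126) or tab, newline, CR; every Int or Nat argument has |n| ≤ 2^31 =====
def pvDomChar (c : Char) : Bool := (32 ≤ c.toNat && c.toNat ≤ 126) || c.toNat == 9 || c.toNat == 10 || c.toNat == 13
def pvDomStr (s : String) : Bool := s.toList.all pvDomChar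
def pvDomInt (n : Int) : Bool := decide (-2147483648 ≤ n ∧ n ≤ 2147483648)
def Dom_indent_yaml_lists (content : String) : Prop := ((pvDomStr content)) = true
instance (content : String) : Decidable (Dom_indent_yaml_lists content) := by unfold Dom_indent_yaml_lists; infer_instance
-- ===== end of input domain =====

-- B replaces A's flat pass gated by a boolean flag with an outer scan that, on spotting a
-- list-key line followed by a list item at equal indent, hands the block to an inner
-- consumer; same output (objective: alternative decomposition, no speed claim).

-- ===== PORT A =====
-- helper get_indent
def pvGetIndent (line : List Char) : Int :=
  PySem.Chars.len line - PySem.Chars.len (PySem.Chars.lstrip line)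

-- helper is_list_key
def pvIsListKey (line : List Char) : Bool :=
  let stripped := PySem.Chars.strip line
  PySem.Chars.endswith stripped [':'] && !PySem.Chars.endswith stripped [':', ':']

-- helper is_list_item
def pvIsListItem (line : List Char) : Bool :=
  PySem.Chars.startswith (PySem.Chars.lstrip line) ['-', ' ']

-- one iteration of A's loop; state = (result, in_list_block, list_base_indent)
def pvAStep (st : List (List Char) × Bool × Int) (line : List Char) :
    List (List Char) × Bool × Int :=
  let result := st.1
  let stripped := PySem.Chars.lstrip line
  let currentIndent := pvGetIndent line
  -- "if result and not in_list_block: …" look-back detection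
  let s2 : Bool × Int :=
    if st.2.1 = false then
      match result.getLast? with
      | some prev =>
        if pvIsListKey prev = true then
          if pvIsListItem line = true ∧ currentIndent = pvGetIndent prev then
            (true, pvGetIndent prev)
          else st.2
        else st.2
      | none => st.2
    else st.2
  let inBlock := s2.1
  let base := s2.2
  if inBlock = true then
    if stripped ≠ [] ∧ pvIsListItem line = false ∧ currentIndent ≤ base then
      (result ++ [line], false, base)
    else if pvIsListItem line = true ∧ currentIndent = base then
      (result ++ [List.replicate (base + 2).toNat ' ' ++ stripped], true, base)
    else if currentIndent = base ∧ stripped ≠ [] then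
      (result ++ [List.replicate (base + 2).toNat ' ' ++ stripped], true, base)
    else if stripped = [] then
      (result ++ [line], false, base)
    else
      (result ++ [' ' :: ' ' :: line], true, base)
  else
    (result ++ [line], inBlock, base)

def indent_yaml_lists (content : String) : String :=
  let lines := PySem.Chars.splitOn content.toList ['\n']
  String.ofList (PySem.Chars.join ['\n'] (lines.foldl pvAStep ([], false, 0)).1)

-- ===== PORT B =====
-- B's inner while loop: consume a list block; returns (emitted lines, unconsumed suffix)
def pvBConsume (base : Int) : List (List Char) → List (List Char) × List (List Char)
  | [] => ([], [])
  | cur :: r =>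
    let st := PySem.Chars.lstrip cur
    let ind := PySem.Chars.len cur - PySem.Chars.len st
    if st = [] then ([cur], r)
    else if PySem.Chars.startswith st ['-', ' '] = false ∧ ind ≤ base then ([], cur :: r)
    else
      let piece :=
        if PySem.Chars.startswith st ['-', ' '] = true ∧ ind = base then
          List.replicate (base + 2).toNat ' ' ++ st
        else ' ' :: ' ' :: cur
      let q := pvBConsume base r
      (piece :: q.1, q.2)

-- the inner loop never hands back more lines than it was given (termination of the outer scan)
theorem pvBConsume_snd_len (base : Int) (ls : List (List Char)) :
    (pvBConsume base ls).2.length ≤ ls.length := by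
  induction ls with
  | nil => simp [pvBConsume]
  | cons cur r ih =>
    simp only [pvBConsume]
    split_ifs <;> simp <;> omega

-- B's detection: current line is a list key and the next line is a list item at equal indent
def pvDetect (line : List Char) (rest : List (List Char)) : Bool :=
  let s := PySem.Chars.strip line
  (PySem.Chars.endswith s [':'] && !PySem.Chars.endswith s [':', ':']) &&
    (match rest with
     | nxt :: _ =>
       PySem.Chars.startswith (PySem.Chars.lstrip nxt) ['-', ' '] &&
         (PySem.Chars.len nxt - PySem.Chars.len (PySem.Chars.lstrip nxt) ==
           PySem.Chars.len line - PySem.Chars.len (PySem.Chars.lstrip line))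
     | [] => false)

-- B's outer while loop
def pvBOuter : List (List Char) → List (List Char)
  | [] => []
  | line :: rest =>
    if pvDetect line rest = true then
      let q := pvBConsume (PySem.Chars.len line - PySem.Chars.len (PySem.Chars.lstrip line)) rest
      line :: (q.1 ++ pvBOuter q.2)
    else
      line :: pvBOuter rest
termination_by ls => ls.length
decreasing_by
  · have := pvBConsume_snd_len (PySem.Chars.len line - PySem.Chars.len (PySem.Chars.lstrip line)) rest
    simp [PySem.Chars.len] at this ⊢
    omega
  · simp

def indent_yaml_lists_alt (content : String) : String :=
  String.ofList (PySem.Chars.join ['\n'] (pvBOuter (PySem.Chars.splitOn content.toList ['\n'])))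

-- ===== PRECONDITION & SPEC =====
def Spec_indent_yaml_lists (content : String) (out : String) : Prop := out = indent_yaml_lists_alt content
instance (content : String) (out : String) : Decidable (Spec_indent_yaml_lists content out) := by unfold Spec_indent_yaml_lists; infer_instance

-- ===== CLAIM (what is proved, stated in full; the proofs are below) =====
def Claim_equal_indent_yaml_lists : Prop := ∀ (content : String), Dom_indent_yaml_lists content → Spec_indent_yaml_lists content (indent_yaml_lists content)

-- ===== LEMMAS AND PROOFS =====

-- what B emits after having just emitted line `p` in the outer scan
def pvCont (p : List Char) (ls : List (List Char)) : List (List Char) :=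
  if pvDetect p ls = true then
    let q := pvBConsume (PySem.Chars.len p - PySem.Chars.len (PySem.Chars.lstrip p)) ls
    q.1 ++ pvBOuter q.2
  else pvBOuter ls

-- what B emits while the inner consumer is running with base `b`
def pvAfterTrue (b : Int) (ls : List (List Char)) : List (List Char) :=
  (pvBConsume b ls).1 ++ pvBOuter (pvBConsume b ls).2

theorem pvBOuter_cons (x : List Char) (r : List (List Char)) :
    pvBOuter (x :: r) = x :: pvCont x r := by
  rw [pvBOuter, pvCont]
  split_ifs <;> rfl

theorem pvDetect_of_blank (x : List Char) (r : List (List Char))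
    (h : PySem.Chars.lstrip x = []) : pvDetect x r = false := by
  have hs : PySem.Chars.strip x = [] := by
    simp [PySem.Chars.strip, h, PySem.Chars.rstrip]
  have he : PySem.Chars.endswith ([] : List Char) [':'] = false := by decide
  simp [pvDetect, hs, he]

theorem pvContNil (p : List Char) : pvCont p [] = [] := by
  simp [pvCont, pvDetect, pvBOuter]

theorem pvAfterTrueNil (b : Int) : pvAfterTrue b [] = [] := by
  simp [pvAfterTrue, pvBConsume, pvBOuter]

-- a blank line is not a list item
theorem pvIsListItem_of_blank (x : List Char) (h : PySem.Chars.lstrip x = []) :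
    pvIsListItem x = false := by
  simp [pvIsListItem, h]; decide

-- a list item has a nonempty lstrip
theorem pvLstrip_ne_nil_of_item (x : List Char) (h : pvIsListItem x = true) :
    PySem.Chars.lstrip x ≠ [] := by
  intro he
  rw [pvIsListItem_of_blank x he] at h
  exact Bool.false_ne_true h

-- A's step with the flag up
theorem pvAStep_true (acc : List (List Char)) (b : Int) (x : List Char) :
    pvAStep (acc, true, b) x =
      (if PySem.Chars.lstrip x ≠ [] ∧ pvIsListItem x = false ∧ pvGetIndent x ≤ b then
        (acc ++ [x], false, b)
      else if pvIsListItem x = true ∧ pvGetIndent x = b then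
        (acc ++ [List.replicate (b + 2).toNat ' ' ++ PySem.Chars.lstrip x], true, b)
      else if pvGetIndent x = b ∧ PySem.Chars.lstrip x ≠ [] then
        (acc ++ [List.replicate (b + 2).toNat ' ' ++ PySem.Chars.lstrip x], true, b)
      else if PySem.Chars.lstrip x = [] then
        (acc ++ [x], false, b)
      else
        (acc ++ [' ' :: ' ' :: x], true, b)) := by
  simp [pvAStep]

-- A's step with the flag down and previous output line p
theorem pvAStep_false (acc : List (List Char)) (b : Int) (x p : List Char)
    (hp : acc.getLast? = some p) :
    pvAStep (acc, false, b) x =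
      (if pvIsListKey p = true ∧ pvIsListItem x = true ∧ pvGetIndent x = pvGetIndent p then
        (acc ++ [List.replicate (pvGetIndent p + 2).toNat ' ' ++ PySem.Chars.lstrip x],
          true, pvGetIndent p)
      else (acc ++ [x], false, b)) := by
  by_cases hk : pvIsListKey p = true
  · by_cases hd : pvIsListItem x = true ∧ pvGetIndent x = pvGetIndent p
    · have hne := pvLstrip_ne_nil_of_item x hd.1
      simp [pvAStep, hp, hk, hd, hne]
    · simp [pvAStep, hp, hk, hd]
  · simp [pvAStep, hp, hk]

-- B's detection, rewritten through A's helpers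
theorem pvDetect_cons (p x : List Char) (r : List (List Char)) :
    pvDetect p (x :: r) =
      (pvIsListKey p && (pvIsListItem x && (pvGetIndent x == pvGetIndent p))) := by
  simp [pvDetect, pvIsListKey, pvIsListItem, pvGetIndent, PySem.Chars.len]

-- the two runs, related at every intermediate state
theorem pvMain (n : Nat) : ∀ (ls : List (List Char)), ls.length ≤ n →
    (∀ (acc : List (List Char)) (b : Int) (p : List Char), acc.getLast? = some p →
      (ls.foldl pvAStep (acc, false, b)).1 = acc ++ pvCont p ls) ∧
    (∀ (acc : List (List Char)) (b : Int),
      (ls.foldl pvAStep (acc, true, b)).1 = acc ++ pvAfterTrue b ls) := by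
  induction n with
  | zero =>
    intro ls hls
    have : ls = [] := List.length_eq_zero_iff.mp (Nat.le_zero.mp hls)
    subst this
    exact ⟨fun acc b p _ => by simp [pvContNil], fun acc b => by simp [pvAfterTrueNil]⟩
  | succ n ih =>
    intro ls hls
    cases ls with
    | nil =>
      exact ⟨fun acc b p _ => by simp [pvContNil], fun acc b => by simp [pvAfterTrueNil]⟩
    | cons x r =>
      have hr : r.length ≤ n := by simpa using hls
      have IH1 := fun acc b p hp => ((ih r hr).1 acc b p hp)
      have IH2 := fun acc b => ((ih r hr).2 acc b)
      constructor
      · -- flag down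
        intro acc b p hp
        rw [List.foldl_cons, pvAStep_false acc b x p hp]
        by_cases hd : pvIsListKey p = true ∧ pvIsListItem x = true ∧ pvGetIndent x = pvGetIndent p
        · rw [if_pos hd]
          have hdet : pvDetect p (x :: r) = true := by
            rw [pvDetect_cons]
            simp [hd.1, hd.2.1, hd.2.2]
          have hne := pvLstrip_ne_nil_of_item x hd.2.1
          have hcons : pvBConsume (pvGetIndent p) (x :: r) =
              ((List.replicate (pvGetIndent p + 2).toNat ' ' ++ PySem.Chars.lstrip x) ::
                (pvBConsume (pvGetIndent p) r).1, (pvBConsume (pvGetIndent p) r).2) := by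
            have hit : PySem.Chars.startswith (PySem.Chars.lstrip x) ['-', ' '] = true := hd.2.1
            have hindeq : (x.length : Int) - ((PySem.Chars.lstrip x).length : Int) =
                pvGetIndent p := by
              simpa [pvGetIndent, PySem.Chars.len] using hd.2.2
            simp [pvBConsume, hne, hit, hindeq]
          have : pvCont p (x :: r) =
              (List.replicate (pvGetIndent p + 2).toNat ' ' ++ PySem.Chars.lstrip x) ::
                pvAfterTrue (pvGetIndent p) r := by
            rw [pvCont, if_pos hdet]
            show (pvBConsume (pvGetIndent p) (x :: r)).1 ++
                pvBOuter (pvBConsume (pvGetIndent p) (x :: r)).2 = _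
            rw [hcons, pvAfterTrue]
            simp
          rw [this, IH2]
          simp
        · rw [if_neg hd]
          have hdet : pvDetect p (x :: r) = false := by
            rw [pvDetect_cons]
            by_contra hc
            simp only [Bool.not_eq_false, Bool.and_eq_true, beq_iff_eq] at hc
            exact hd ⟨hc.1, hc.2.1, hc.2.2⟩
          have : pvCont p (x :: r) = x :: pvCont x r := by
            rw [pvCont, if_neg (by simp [hdet]), pvBOuter_cons]
          rw [this, IH1 (acc ++ [x]) b x (by simp)]
          simp
      · -- flag up
        intro acc b
        rw [List.foldl_cons, pvAStep_true]
        by_cases hst : PySem.Chars.lstrip x = []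
        · have hit := pvIsListItem_of_blank x hst
          rw [if_neg (by simp [hst]), if_neg (by simp [hit]), if_neg (by simp [hst]),
            if_pos hst]
          rw [IH1 (acc ++ [x]) b x (by simp)]
          have : pvAfterTrue b (x :: r) = x :: pvBOuter r := by
            rw [pvAfterTrue]
            simp [pvBConsume, hst]
          have hcx : pvCont x r = pvBOuter r := by
            rw [pvCont, pvDetect_of_blank x r hst]
            simp
          rw [this, hcx]
          simp
        · by_cases hit : pvIsListItem x = true
          · have hne := pvLstrip_ne_nil_of_item x hit
            by_cases hib : pvGetIndent x = b
            · rw [if_neg (by simp [hit]), if_pos ⟨hit, hib⟩, IH2]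
              have : pvAfterTrue b (x :: r) =
                  (List.replicate (b + 2).toNat ' ' ++ PySem.Chars.lstrip x) ::
                    pvAfterTrue b r := by
                rw [pvAfterTrue, pvAfterTrue]
                have hi : (x.length : Int) - ((PySem.Chars.lstrip x).length : Int) = b := by
                  simpa [pvGetIndent, PySem.Chars.len] using hib
                have hsw : PySem.Chars.startswith (PySem.Chars.lstrip x) ['-', ' '] = true := hit
                simp [pvBConsume, hne, hsw, hi]
              rw [this]
              simp
            · rw [if_neg (by simp [hit]), if_neg (by simp [hib]),
                if_neg (by simp [hib]), if_neg (by simp [hst]), IH2]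
              have : pvAfterTrue b (x :: r) = (' ' :: ' ' :: x) :: pvAfterTrue b r := by
                rw [pvAfterTrue, pvAfterTrue]
                have hi : ¬((x.length : Int) - ((PySem.Chars.lstrip x).length : Int) = b) := by
                  simpa [pvGetIndent, PySem.Chars.len] using hib
                have hsw : PySem.Chars.startswith (PySem.Chars.lstrip x) ['-', ' '] = true := hit
                simp [pvBConsume, hst, hsw, hi]
              rw [this]
              simp
          · have hit' : pvIsListItem x = false := by simpa using hit
            by_cases hle : pvGetIndent x ≤ b
            · rw [if_pos ⟨hst, hit', hle⟩, IH1 (acc ++ [x]) b x (by simp)]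
              have : pvAfterTrue b (x :: r) = x :: pvCont x r := by
                rw [pvAfterTrue]
                have hi : (x.length : Int) - ((PySem.Chars.lstrip x).length : Int) ≤ b := by
                  simpa [pvGetIndent, PySem.Chars.len] using hle
                have hsw : PySem.Chars.startswith (PySem.Chars.lstrip x) ['-', ' '] = false := hit'
                simp [pvBConsume, hst, hsw, hi, pvBOuter_cons]
              rw [this]
              simp
            · have hib : ¬(pvGetIndent x = b) := fun he => hle (le_of_eq he)
              rw [if_neg (by tauto), if_neg (by simp [hib]), if_neg (by simp [hib]),
                if_neg (by simp [hst]), IH2]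
              have : pvAfterTrue b (x :: r) = (' ' :: ' ' :: x) :: pvAfterTrue b r := by
                rw [pvAfterTrue, pvAfterTrue]
                have hsw : PySem.Chars.startswith (PySem.Chars.lstrip x) ['-', ' '] = false := hit'
                have hi : ¬((x.length : Int) - ((PySem.Chars.lstrip x).length : Int) ≤ b) := by
                  simpa [pvGetIndent, PySem.Chars.len] using hle
                simp [pvBConsume, hst, hsw, hi]
              rw [this]
              simp

theorem pvTop (ls : List (List Char)) :
    (ls.foldl pvAStep (([] : List (List Char)), false, (0 : Int))).1 = pvBOuter ls := by
  cases ls with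
  | nil => simp [pvBOuter]
  | cons x r =>
    have hstep : pvAStep (([] : List (List Char)), false, (0 : Int)) x = ([x], false, 0) := by
      simp [pvAStep]
    rw [List.foldl_cons, hstep, pvBOuter_cons]
    have := (pvMain r.length r le_rfl).1 [x] 0 x (by simp)
    simpa using this

-- ===== VERDICT (by name: the statement is the Claim_ definition above) =====
theorem indent_yaml_lists_spec : Claim_equal_indent_yaml_lists := by
  intro content _
  exact congrArg (fun l => String.ofList (PySem.Chars.join ['\n'] l))
    (pvTop (PySem.Chars.splitOn content.toList ['\n']))
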